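-- pv_equiv track=rewrite | github.com/aatishjainn/MusicBrain | test3.py | deterministic_producer_check
-- ===== SOURCE A (Python) =====
-- from typing import Optional, Dict, Any, List, Tuple
--
-- def deterministic_producer_check(info: Dict[str,Any], artist_query: str) -> Optional[bool]:
--     if not info:
--         return None
--     producers = info.get("credits", {}).get("producer", []) or []
--     if not producers:
--         return None
--     aq = artist_query.lower().strip()
--     for p in producers:
--         if p and p.lower().strip() == aq:
--             return True
--     for p in producers:
--         if p and aq in p.lower():
--             return True
--     return False
-- ===== SOURCE B (Python) =====
-- from typing import Optional, Dict, Any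
--
-- def deterministic_producer_check(info: Dict[str, Any], artist_query: str) -> Optional[bool]:
--     if not info:
--         return None
--     producers = info.get("credits", {}).get("producer", []) or []
--     if not producers:
--         return None
--     aq = artist_query.lower().strip()
--     return any(p and aq in p.lower() for p in producers)
-- ===== Notes on version B (the rewrite author's own statement) =====
-- stated objective: simpler
-- what changed: The two sequential scans (exact-match pass then substring pass) are replaced by a single any() pass testing only the substring condition, which subsumes the exact-match test because a stripped lowercase string is always a substring of the lowercase string.
import Mathlib
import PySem

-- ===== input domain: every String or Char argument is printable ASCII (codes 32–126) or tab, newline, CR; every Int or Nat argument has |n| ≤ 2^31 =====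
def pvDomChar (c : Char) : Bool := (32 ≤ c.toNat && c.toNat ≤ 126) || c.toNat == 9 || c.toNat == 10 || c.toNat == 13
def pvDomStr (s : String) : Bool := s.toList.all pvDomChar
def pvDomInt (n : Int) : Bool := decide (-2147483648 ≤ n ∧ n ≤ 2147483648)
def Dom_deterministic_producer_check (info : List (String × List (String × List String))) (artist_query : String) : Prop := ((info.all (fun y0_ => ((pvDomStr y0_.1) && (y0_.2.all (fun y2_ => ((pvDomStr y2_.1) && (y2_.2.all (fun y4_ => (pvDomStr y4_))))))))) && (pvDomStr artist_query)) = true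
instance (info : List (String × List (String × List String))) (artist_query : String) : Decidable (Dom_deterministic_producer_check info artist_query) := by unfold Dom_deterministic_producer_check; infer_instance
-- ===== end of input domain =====

-- B replaces A's two sequential scans (exact-match then substring) by one any-pass over the
-- substring test, which subsumes the exact-match test; objective: simpler.

-- ===== PORT A =====
-- first loop of A: exact match of the stripped lowercase producer against aq
def pvLoopExact (aq : String) : List String → Bool
  | [] => false
  | p :: rest =>
    if p ≠ "" ∧ PySem.Str.strip (PySem.Str.lower p) = aq then true
    else pvLoopExact aq rest

-- second loop of A: aq is a substring of the lowercase producer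
def pvLoopSub (aq : String) : List String → Bool
  | [] => false
  | p :: rest =>
    if p ≠ "" ∧ PySem.Str.isIn aq (PySem.Str.lower p) = true then true
    else pvLoopSub aq rest

def deterministic_producer_check (info : List (String × List (String × List String))) (artist_query : String) : Option Bool :=
  if info = [] then none
  else
    let credits := (PySem.Dict.mk info).getD "credits" []
    let producers0 := (PySem.Dict.mk credits).getD "producer" []
    let producers := if producers0 = [] then [] else producers0   -- "… or []"
    if producers = [] then none
    else
      let aq := PySem.Str.strip (PySem.Str.lower artist_query)
      if pvLoopExact aq producers then some true
      else if pvLoopSub aq producers then some true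
      else some false

-- ===== PORT B =====
def deterministic_producer_check_alt (info : List (String × List (String × List String))) (artist_query : String) : Option Bool :=
  if info = [] then none
  else
    let credits := (PySem.Dict.mk info).getD "credits" []
    let producers0 := (PySem.Dict.mk credits).getD "producer" []
    let producers := if producers0 = [] then [] else producers0   -- "… or []"
    if producers = [] then none
    else
      let aq := PySem.Str.strip (PySem.Str.lower artist_query)
      some (producers.any (fun p => !(p == "") && PySem.Str.isIn aq (PySem.Str.lower p)))

-- ===== PRECONDITION & SPEC =====
def Spec_deterministic_producer_check (info : List (String × List (String × List String))) (artist_query : String) (out : Option Bool) : Prop := out = deterministic_producer_check_alt info artist_query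
instance (info : List (String × List (String × List String))) (artist_query : String) (out : Option Bool) : Decidable (Spec_deterministic_producer_check info artist_query out) := by unfold Spec_deterministic_producer_check; infer_instance

-- ===== CLAIM (what is proved, stated in full; the proofs are below) =====
def Claim_equal_deterministic_producer_check : Prop := ∀ (info : List (String × List (String × List String))) (artist_query : String), Dom_deterministic_producer_check info artist_query → Spec_deterministic_producer_check info artist_query (deterministic_producer_check info artist_query)

-- ===== LEMMAS AND PROOFS =====

-- stripping a string leaves an infix of it
theorem pvStrip_infix (l : List Char) : PySem.Chars.strip l <:+: l := by
  have hls : PySem.Chars.lstrip l <:+ l := List.dropWhile_suffix _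
  have hrs : PySem.Chars.rstrip (PySem.Chars.lstrip l) <+: PySem.Chars.lstrip l := by
    unfold PySem.Chars.rstrip
    obtain ⟨t, ht⟩ := List.dropWhile_suffix (l := (PySem.Chars.lstrip l).reverse) PySem.Chars.isspace
    exact ⟨t.reverse, by rw [← List.reverse_append, ht, List.reverse_reverse]⟩
  exact (hrs.isInfix).trans hls.isInfix

-- an exact match implies a substring match
theorem pvExact_imp_sub (aq p : String)
    (h : PySem.Str.strip (PySem.Str.lower p) = aq) :
    PySem.Str.isIn aq (PySem.Str.lower p) = true := by
  rw [PySem.Str.isIn_iff_infix, ← h, PySem.Str.toList_strip]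
  exact pvStrip_infix _

-- A's second loop is List.any of B's predicate
theorem pvLoopSub_eq_any (aq : String) (ps : List String) :
    pvLoopSub aq ps = ps.any (fun p => !(p == "") && PySem.Str.isIn aq (PySem.Str.lower p)) := by
  induction ps with
  | nil => rfl
  | cons p rest ih =>
    simp only [pvLoopSub, List.any_cons, ih]
    by_cases h0 : p = ""
    · subst h0
      simp
    · have hb : (p == "") = false := beq_eq_false_iff_ne.mpr h0
      by_cases hin : PySem.Str.isIn aq (PySem.Str.lower p) = true
      · rw [if_pos ⟨h0, hin⟩]
        simp only [PySem.Str.isIn_eq, PySem.Str.toList_lower] at hin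
        simp [hb, hin]
      · rw [if_neg (fun hc => hin hc.2)]
        simp only [Bool.not_eq_true, PySem.Str.isIn_eq, PySem.Str.toList_lower] at hin
        simp [hb, hin]

-- if A's first loop fires then A's second loop fires too
theorem pvLoopExact_imp_sub (aq : String) (ps : List String)
    (h : pvLoopExact aq ps = true) : pvLoopSub aq ps = true := by
  induction ps with
  | nil => exact absurd h (by simp [pvLoopExact])
  | cons p rest ih =>
    simp only [pvLoopExact] at h
    simp only [pvLoopSub]
    by_cases hp : p ≠ "" ∧ PySem.Str.strip (PySem.Str.lower p) = aq
    · rw [if_pos ⟨hp.1, pvExact_imp_sub aq p hp.2⟩]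
    · rw [if_neg hp] at h
      split_ifs with h2
      · rfl
      · exact ih h

-- the tail of both ports after the empty-producers guard agree
theorem pvTail_eq (aq : String) (producers : List String) :
    (if pvLoopExact aq producers then some true
     else if pvLoopSub aq producers then some true else some false) =
    some (producers.any (fun p => !(p == "") && PySem.Str.isIn aq (PySem.Str.lower p))) := by
  rw [← pvLoopSub_eq_any]
  by_cases hsub : pvLoopSub aq producers = true
  · by_cases he : pvLoopExact aq producers = true
    · simp [he, hsub]
    · simp only [Bool.not_eq_true] at he
      simp [he, hsub]
  · have he : pvLoopExact aq producers ≠ true := fun h => hsub (pvLoopExact_imp_sub _ _ h)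
    simp only [Bool.not_eq_true] at hsub he
    simp [hsub, he]

-- ===== VERDICT (by name: the statement is the Claim_ definition above) =====
theorem deterministic_producer_check_spec : Claim_equal_deterministic_producer_check := by
  intro info artist_query _
  unfold Spec_deterministic_producer_check deterministic_producer_check deterministic_producer_check_alt
  by_cases h1 : info = []
  · rw [if_pos h1, if_pos h1]
  · rw [if_neg h1, if_neg h1]
    dsimp only
    by_cases hpr : (if (PySem.Dict.mk ((PySem.Dict.mk info).getD "credits" [])).getD "producer" [] = ([] : List String)
        then ([] : List String) else (PySem.Dict.mk ((PySem.Dict.mk info).getD "credits" [])).getD "producer" []) = []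
    · rw [if_pos hpr, if_pos hpr]
    · rw [if_neg hpr, if_neg hpr]
      exact pvTail_eq _ _
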